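-- pv_equiv track=rewrite | github.com/PavelGolkin/Kernighan-Lin_methods | main.py | Kernigan_Lin_for_all_vertices
-- ===== SOURCE A (Python) =====
-- def Kernigan_Lin_for_all_vertices(graph):
--     def KL_all_vertices(graph):
--         n = len(graph)
--
--         A = {v: v for v in range(n // 2)}
--         B = {v: v for v in range(n // 2, n)}
--
--         cut_size = checking_size(graph, A.keys(), B.keys())
--         check = True
--         step = 0
--
--         while check:
--             check = False
--             for i in A.keys():
--
--                 best_better = 0
--                 best_vert = None
--
--                 for j in B.keys():
--                     step += 1
--                     bet = checking_bet(graph, i, j, A.values(), B.values())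
--
--                     if bet > best_better:
--                         best_better = bet
--                         best_vert = j
--
--                 if best_vert is not None:
--                     A[i] = B[best_vert]
--                     B[best_vert] = i
--                     cut_size += best_better
--                     check = True
--
--             return list(A.values()), list(B.values()), cut_size, step
--
--     def checking_size(graph, A, B):
--         size = 0
--
--         for i in A:
--             for j in B:
--
--                 size += graph[i][j]
--
--         return size
--
--     def checking_bet(graph, i, j, A, B):
--         bet = 0
--
--         for k in A:
--             bet -= graph[i][k]
--             bet += graph[j][k]
--
--         for k in B:
--             bet -= graph[j][k]
--             bet += graph[i][k]
--
--         bet += graph[i][i]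
--         bet += graph[j][j]
--         bet -= 2 * graph[i][j]
--
--         return bet
--
--     return KL_all_vertices(graph)
-- ===== SOURCE B (Python) =====
-- def Kernigan_Lin_for_all_vertices(graph):
--     n = len(graph)
--     half = n // 2
--     Avals = list(range(half))
--     Bvals = list(range(half, n))
--     cut_size = sum(graph[i][j] for i in range(half) for j in range(half, n))
--     # per-vertex sums of edge weights into the current A-side / B-side value sets
--     sA = [sum(graph[x][k] for k in Avals) for x in range(n)]
--     sB = [sum(graph[x][k] for k in Bvals) for x in range(n)]
--     step = half * (n - half)
--     for i in range(half):
--         best_better = 0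
--         best_key = None
--         for j in range(half, n):
--             bet = (sB[i] - sA[i]) + (sA[j] - sB[j]) \
--                   + graph[i][i] + graph[j][j] - 2 * graph[i][j]
--             if bet > best_better:
--                 best_better = bet
--                 best_key = j
--         if best_key is not None:
--             a_old = Avals[i]
--             b_old = Bvals[best_key - half]
--             Avals[i] = b_old
--             Bvals[best_key - half] = i
--             cut_size += best_better
--             sA = [sA[x] + graph[x][b_old] - graph[x][a_old] for x in range(n)]
--             sB = [sB[x] + graph[x][i] - graph[x][b_old] for x in range(n)]
--     return Avals, Bvals, cut_size, step
-- ===== Notes on version B (the rewrite author's own statement) =====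
-- stated objective: faster
-- what changed: B precomputes per-vertex sums of edge weights over each side's current value set so every pair gain is O(1) instead of an O(n) rescan (updating the sums in O(n) after a swap), replaces the two dicts by plain index lists, and computes the step counter in closed form.
-- outside the precondition, e.g. on Kernigan_Lin_for_all_vertices([[]]): A returns ([], [0], 0, 0), B raises IndexError
import Mathlib
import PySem

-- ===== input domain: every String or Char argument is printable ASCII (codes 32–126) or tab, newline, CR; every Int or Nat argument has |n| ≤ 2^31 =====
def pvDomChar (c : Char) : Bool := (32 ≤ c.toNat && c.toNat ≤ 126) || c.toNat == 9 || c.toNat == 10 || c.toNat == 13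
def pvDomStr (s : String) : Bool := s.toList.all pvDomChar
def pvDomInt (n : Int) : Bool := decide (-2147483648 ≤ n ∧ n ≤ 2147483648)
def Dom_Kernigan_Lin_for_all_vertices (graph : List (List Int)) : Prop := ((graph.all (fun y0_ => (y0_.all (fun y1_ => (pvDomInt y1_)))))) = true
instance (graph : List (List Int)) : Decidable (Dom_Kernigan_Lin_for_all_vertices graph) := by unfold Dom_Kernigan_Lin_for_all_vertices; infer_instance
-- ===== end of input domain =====

-- B replaces A's O(n)-per-pair gain rescans by precomputed per-vertex side sums updated
-- incrementally after each swap (O(n^2) instead of O(n^3)); equivalence of return values.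

-- ===== PORT A =====
-- graph[i][j]; defaulted total form — Pre_ keeps every index used in range
def pvG (g : List (List Int)) (i j : Int) : Int :=
  (PySem.List.pyGet? ((PySem.List.pyGet? g i).getD []) j).getD 0

def pvCheckSize (g : List (List Int)) (A B : List Int) : Int :=
  A.foldl (fun s i => B.foldl (fun s j => s + pvG g i j) s) 0

def pvCheckBet (g : List (List Int)) (i j : Int) (Av Bv : List Int) : Int :=
  let bet : Int := Av.foldl (fun b k => b - pvG g i k + pvG g j k) 0
  let bet := Bv.foldl (fun b k => b - pvG g j k + pvG g i k) bet
  bet + pvG g i i + pvG g j j - 2 * pvG g i j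

-- body of A's inner 'for j in B.keys()' loop (state: best_better, best_vert, step)
def pvInnerA (g : List (List Int)) (dA dB : PySem.Dict Int Int) (i : Int)
    (acc : Int × Option Int × Int) (j : Int) : Int × Option Int × Int :=
  let step := acc.2.2 + 1
  let bet := pvCheckBet g i j dA.values dB.values
  if bet > acc.1 then (bet, some j, step) else (acc.1, acc.2.1, step)

-- body of A's 'for i in A.keys()' loop (state: A, B, cut_size, step)
def pvStepA (g : List (List Int))
    (st : PySem.Dict Int Int × PySem.Dict Int Int × Int × Int) (i : Int) :
    PySem.Dict Int Int × PySem.Dict Int Int × Int × Int :=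
  let r := st.2.1.keys.foldl (pvInnerA g st.1 st.2.1 i) (0, none, st.2.2.2)
  match r.2.1 with
  | some v => (st.1.insert i ((st.2.1.get? v).getD 0), st.2.1.insert v i, st.2.2.1 + r.1, r.2.2)
  | none => (st.1, st.2.1, st.2.2.1, r.2.2)

def Kernigan_Lin_for_all_vertices (graph : List (List Int)) : List Int × List Int × Int × Int :=
  let n : Int := graph.length
  let dA : PySem.Dict Int Int :=
    (PySem.List.pyRange 0 (PySem.Int.floordiv n 2) 1).foldl (fun d v => d.insert v v) PySem.Dict.empty
  let dB : PySem.Dict Int Int :=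
    (PySem.List.pyRange (PySem.Int.floordiv n 2) n 1).foldl (fun d v => d.insert v v) PySem.Dict.empty
  let cut := pvCheckSize graph dA.keys dB.keys
  -- 'while check:' ends its first iteration with an unconditional return: one pass over A.keys()
  let st := dA.keys.foldl (pvStepA graph) (dA, dB, cut, 0)
  (st.1.values, st.2.1.values, st.2.2.1, st.2.2.2)

-- ===== PORT B =====
-- body of B's inner 'for j in range(half, n)' loop (state: best_better, best_key)
def pvInnerB (g : List (List Int)) (sa sb : List Int) (i : Int)
    (acc : Int × Option Int) (j : Int) : Int × Option Int :=
  let bet := (PySem.List.pyGetD sb i 0 - PySem.List.pyGetD sa i 0)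
           + (PySem.List.pyGetD sa j 0 - PySem.List.pyGetD sb j 0)
           + pvG g i i + pvG g j j - 2 * pvG g i j
  if bet > acc.1 then (bet, some j) else acc

-- body of B's 'for i in range(half)' loop (state: Avals, Bvals, cut_size, sA, sB)
def pvStepB (g : List (List Int)) (n half : Int)
    (st : List Int × List Int × Int × List Int × List Int) (i : Int) :
    List Int × List Int × Int × List Int × List Int :=
  let r := (PySem.List.pyRange half n 1).foldl (pvInnerB g st.2.2.2.1 st.2.2.2.2 i) (0, none)
  match r.2 with
  | some bk =>
    let aOld := PySem.List.pyGetD st.1 i 0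
    let bOld := PySem.List.pyGetD st.2.1 (bk - half) 0
    (PySem.List.pySetD st.1 i bOld,
     PySem.List.pySetD st.2.1 (bk - half) i,
     st.2.2.1 + r.1,
     (PySem.List.pyRange 0 n 1).map (fun x => PySem.List.pyGetD st.2.2.2.1 x 0 + pvG g x bOld - pvG g x aOld),
     (PySem.List.pyRange 0 n 1).map (fun x => PySem.List.pyGetD st.2.2.2.2 x 0 + pvG g x i - pvG g x bOld))
  | none => st

def Kernigan_Lin_for_all_vertices_alt (graph : List (List Int)) : List Int × List Int × Int × Int :=
  let n : Int := graph.length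
  let half := PySem.Int.floordiv n 2
  let Av := PySem.List.pyRange 0 half 1
  let Bv := PySem.List.pyRange half n 1
  let cut := ((PySem.List.pyRange 0 half 1).map
      (fun i => ((PySem.List.pyRange half n 1).map (fun j => pvG graph i j)).sum)).sum
  let sa := (PySem.List.pyRange 0 n 1).map (fun x => (Av.map (fun k => pvG graph x k)).sum)
  let sb := (PySem.List.pyRange 0 n 1).map (fun x => (Bv.map (fun k => pvG graph x k)).sum)
  let step := half * (n - half)
  let st := (PySem.List.pyRange 0 half 1).foldl (pvStepB graph n half) (Av, Bv, cut, sa, sb)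
  (st.1, st.2.1, st.2.2.1, step)

-- ===== PRECONDITION & SPEC =====
-- Pre_ excludes exactly the inputs where an index is out of range: A raises IndexError on every
-- such input except the one-vertex graph whose single row is empty, on which A touches no entry
-- and returns while B's per-vertex sum precomputation indexes the row and raises.
def Pre_Kernigan_Lin_for_all_vertices (graph : List (List Int)) : Prop :=
  ∀ row ∈ graph, graph.length ≤ row.length
instance (graph : List (List Int)) : Decidable (Pre_Kernigan_Lin_for_all_vertices graph) := by
  unfold Pre_Kernigan_Lin_for_all_vertices; infer_instance

def pvWitness_Kernigan_Lin_for_all_vertices : List (List Int) :=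
  [[0, 1, 2, 0], [1, 0, 1, 3], [2, 1, 0, 1], [0, 3, 1, 0]]

def Spec_Kernigan_Lin_for_all_vertices (graph : List (List Int)) (out : List Int × List Int × Int × Int) : Prop := out = Kernigan_Lin_for_all_vertices_alt graph
instance (graph : List (List Int)) (out : List Int × List Int × Int × Int) : Decidable (Spec_Kernigan_Lin_for_all_vertices graph out) := by unfold Spec_Kernigan_Lin_for_all_vertices; infer_instance

-- ===== CLAIM (what is proved, stated in full; the proofs are below) =====
def Claim_equal_Kernigan_Lin_for_all_vertices : Prop := ∀ (graph : List (List Int)), Dom_Kernigan_Lin_for_all_vertices graph → Pre_Kernigan_Lin_for_all_vertices graph → Spec_Kernigan_Lin_for_all_vertices graph (Kernigan_Lin_for_all_vertices graph)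

-- ===== LEMMAS AND PROOFS =====
-- the per-vertex side sum B maintains: sum of g[x][k] over the current values k of one side
def pvSA (g : List (List Int)) (vs : List Int) (x : Int) : Int :=
  (vs.map (fun k => pvG g x k)).sum

def pvSaOf (g : List (List Int)) (nN : Nat) (vs : List Int) : List Int :=
  (PySem.List.pyRange 0 (nN : Int) 1).map (fun x => pvSA g vs x)

theorem pv_sum_map_sub (l : List Int) (f h : Int → Int) :
    (l.map (fun k => h k - f k)).sum = (l.map h).sum - (l.map f).sum := by
  induction l with
  | nil => simp
  | cons a t ih => simp [ih]; ring

theorem pv_foldl_sub_add (l : List Int) (f h : Int → Int) (c : Int) :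
    l.foldl (fun b k => b - f k + h k) c = c + (l.map h).sum - (l.map f).sum := by
  have he : (fun (b : Int) k => b - f k + h k) = fun b k => b + (h k - f k) := by
    funext b k; ring
  rw [he, PySem.List.foldl_add, pv_sum_map_sub]; ring

theorem pv_checkBet_eq (g : List (List Int)) (i j : Int) (Av Bv : List Int) :
    pvCheckBet g i j Av Bv
      = (pvSA g Bv i - pvSA g Av i) + (pvSA g Av j - pvSA g Bv j)
        + pvG g i i + pvG g j j - 2 * pvG g i j := by
  simp only [pvCheckBet, pvSA, pv_foldl_sub_add]
  ring

theorem pv_sum_map_set (f : Int → Int) (l : List Int) (p : Nat) (w : Int) (hp : p < l.length) :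
    ((l.set p w).map f).sum = (l.map f).sum + f w - f l[p] := by
  induction l generalizing p with
  | nil => simp at hp
  | cons a t ih =>
    cases p with
    | zero => simp; ring
    | succ q =>
      simp only [List.set_cons_succ, List.map_cons, List.sum_cons,
        ih q (by simpa using hp), List.getElem_cons_succ]
      ring

theorem pv_zip_self (l : List Int) : l.map (fun a => (a, a)) = l.zip l := by
  induction l with
  | nil => rfl
  | cons a t ih => simp [ih]

-- replacing the value at an existing key of a zip-dict is a positional set
theorem pv_map_replace_zip (ks vs : List Int) (p : Nat) (w : Int)
    (hnd : ks.Nodup) (hlen : vs.length = ks.length) (hp : p < ks.length) :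
    (ks.zip vs).map (fun q => if (q.1 == ks[p]) = true then (ks[p], w) else q)
      = ks.zip (vs.set p w) := by
  induction ks generalizing vs p with
  | nil => simp at hp
  | cons k kt ih =>
    cases vs with
    | nil => simp at hlen
    | cons v vt =>
      cases p with
      | zero =>
        simp only [List.getElem_cons_zero, List.zip_cons_cons, List.map_cons, beq_self_eq_true,
          if_true, List.set_cons_zero]
        congr 1
        have : ∀ q ∈ kt.zip vt, (if (q.1 == k) = true then (k, w) else q) = q := by
          intro q hq
          have h1 : q.1 ∈ kt := (List.of_mem_zip hq).1
          have : q.1 ≠ k := by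
            intro h; exact (List.nodup_cons.mp hnd).1 (h ▸ h1)
          simp [this]
        rw [List.map_congr_left this]
        simp
      | succ q =>
        have hq : q < kt.length := by simpa using hp
        have hk : k ≠ kt[q] := by
          intro h
          exact (List.nodup_cons.mp hnd).1 (h ▸ kt.getElem_mem hq)
        simp only [List.getElem_cons_succ, List.zip_cons_cons, List.map_cons, List.set_cons_succ]
        rw [if_neg (by simpa using hk)]
        rw [ih vt q (List.nodup_cons.mp hnd).2 (by simpa using hlen) hq]

theorem pv_zip_dict_insert (ks vs : List Int) (p : Nat) (w : Int)
    (hnd : ks.Nodup) (hlen : vs.length = ks.length) (hp : p < ks.length) :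
    (PySem.Dict.mk (ks.zip vs)).insert ks[p] w = PySem.Dict.mk (ks.zip (vs.set p w)) := by
  apply PySem.Dict.ext
  have hc : (PySem.Dict.mk (ks.zip vs)).contains ks[p] = true := by
    rw [PySem.Dict.contains_iff_mem_keys]
    show ks[p] ∈ ((ks.zip vs).map Prod.fst)
    rw [List.map_fst_zip (le_of_eq hlen.symm)]
    exact ks.getElem_mem hp
  rw [PySem.Dict.items_insert_of_contains _ _ hc]
  exact pv_map_replace_zip ks vs p w hnd hlen hp

theorem pv_zip_dict_get? (ks vs : List Int) (p : Nat)
    (hnd : ks.Nodup) (hlen : vs.length = ks.length) (hp : p < ks.length) :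
    (PySem.Dict.mk (ks.zip vs)).get? ks[p] = some (vs[p]'(by omega)) := by
  apply PySem.Dict.get?_of_mem_items
  · have := List.getElem_zip (l := ks) (l' := vs) (i := p) (h := by simp [hlen]; omega)
    rw [← this]
    exact List.getElem_mem _
  · show ((ks.zip vs).map Prod.fst).Nodup
    rw [List.map_fst_zip (le_of_eq hlen.symm)]
    exact hnd

theorem pv_zip_dict_keys (ks vs : List Int) (hlen : vs.length = ks.length) :
    (PySem.Dict.mk (ks.zip vs)).keys = ks := by
  show ((ks.zip vs).map Prod.fst) = ks
  exact List.map_fst_zip (le_of_eq hlen.symm)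

theorem pv_zip_dict_values (ks vs : List Int) (hlen : vs.length = ks.length) :
    (PySem.Dict.mk (ks.zip vs)).values = vs := by
  show ((ks.zip vs).map Prod.snd) = vs
  exact List.map_snd_zip (le_of_eq hlen)

-- the inner-loop result option is none, its start value, or an element of the list
theorem pv_innerB_some_mem (g : List (List Int)) (sa sb : List Int) (i : Int) :
    ∀ (L : List Int) (acc : Int × Option Int) (v : Int),
      (L.foldl (pvInnerB g sa sb i) acc).2 = some v → v ∈ L ∨ acc.2 = some v := by
  intro L
  induction L with
  | nil => intro acc v h; right; exact h
  | cons j t ih =>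
    intro acc v h
    rcases ih _ v h with hm | hs
    · left; exact List.mem_cons_of_mem _ hm
    · simp only [pvInnerB] at hs
      split at hs
      · left; simp at hs; simp [hs]
      · rcases ih _ v h with hm | hs'
        · left; exact List.mem_cons_of_mem _ hm
        · simp only [pvInnerB] at hs'
          split at hs'
          · left; simp at hs'; simp [hs']
          · right; exact hs'

-- one inner pass: A's fold tracks B's fold plus the step counter
theorem pv_inner_sim (g : List (List Int)) (hf nN : Nat) (Av Bv : List Int)
    (hA : Av.length = hf) (hB : Bv.length = nN - hf) (hle : hf ≤ nN) (i : Int)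
    (hi0 : 0 ≤ i) (hin : i < (nN : Int)) :
    ∀ (L : List Int), (∀ j ∈ L, 0 ≤ j ∧ j < (nN : Int)) →
    ∀ (bb : Int) (bv : Option Int) (stepv : Int),
      L.foldl (pvInnerA g (PySem.Dict.mk ((PySem.List.pyRange 0 (hf : Int) 1).zip Av))
                          (PySem.Dict.mk ((PySem.List.pyRange (hf : Int) (nN : Int) 1).zip Bv)) i)
              (bb, bv, stepv)
        = ((L.foldl (pvInnerB g (pvSaOf g nN Av) (pvSaOf g nN Bv) i) (bb, bv)).1,
           (L.foldl (pvInnerB g (pvSaOf g nN Av) (pvSaOf g nN Bv) i) (bb, bv)).2,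
           stepv + L.length) := by
  have hKA : (PySem.List.pyRange 0 (hf : Int) 1).length = hf := by
    rw [PySem.List.length_pyRange_one]; omega
  have hKB : (PySem.List.pyRange (hf : Int) (nN : Int) 1).length = nN - hf := by
    rw [PySem.List.length_pyRange_one]; omega
  have hvA := pv_zip_dict_values _ Av (by rw [hKA, hA])
  have hvB := pv_zip_dict_values _ Bv (by rw [hKB, hB])
  intro L
  induction L with
  | nil => intro _ bb bv stepv; simp
  | cons j t ih =>
    intro hmem bb bv stepv
    obtain ⟨hj0, hjn⟩ := hmem j (List.mem_cons_self ..)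
    have hbet : pvCheckBet g i j Av Bv
        = (PySem.List.pyGetD (pvSaOf g nN Bv) i 0 - PySem.List.pyGetD (pvSaOf g nN Av) i 0)
        + (PySem.List.pyGetD (pvSaOf g nN Av) j 0 - PySem.List.pyGetD (pvSaOf g nN Bv) j 0)
        + pvG g i i + pvG g j j - 2 * pvG g i j := by
      simp only [pvSaOf, PySem.List.pyGetD_map_pyRange_of_nonneg _ _ _ _ hi0 hin,
        PySem.List.pyGetD_map_pyRange_of_nonneg _ _ _ _ hj0 hjn]
      exact pv_checkBet_eq g i j Av Bv
    have hone : pvInnerA g (PySem.Dict.mk ((PySem.List.pyRange 0 (hf : Int) 1).zip Av))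
          (PySem.Dict.mk ((PySem.List.pyRange (hf : Int) (nN : Int) 1).zip Bv)) i (bb, bv, stepv) j
        = ((pvInnerB g (pvSaOf g nN Av) (pvSaOf g nN Bv) i (bb, bv) j).1,
           (pvInnerB g (pvSaOf g nN Av) (pvSaOf g nN Bv) i (bb, bv) j).2, stepv + 1) := by
      simp only [pvInnerA, pvInnerB, hvA, hvB, hbet]
      split <;> rfl
    rw [List.foldl_cons, List.foldl_cons, hone,
      ih (fun x hx => hmem x (List.mem_cons_of_mem _ hx)) _ _ (stepv + 1)]
    have hs : stepv + 1 + (t.length : Int) = stepv + ((j :: t).length : Int) := by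
      push_cast [List.length_cons]; ring
    rw [Prod.mk.eta, hs]

-- one outer step preserves the simulation
theorem pv_step_sim (g : List (List Int)) (hf nN : Nat) (hle : hf ≤ nN)
    (Av Bv : List Int) (cutv stepv : Int)
    (hA : Av.length = hf) (hB : Bv.length = nN - hf)
    (i : Int) (iN : Nat) (hi : i = (iN : Int)) (hiN : iN < hf) :
    ∃ Av2 Bv2 cut2,
      pvStepA g (PySem.Dict.mk ((PySem.List.pyRange 0 (hf : Int) 1).zip Av),
                 PySem.Dict.mk ((PySem.List.pyRange (hf : Int) (nN : Int) 1).zip Bv), cutv, stepv) i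
        = (PySem.Dict.mk ((PySem.List.pyRange 0 (hf : Int) 1).zip Av2),
           PySem.Dict.mk ((PySem.List.pyRange (hf : Int) (nN : Int) 1).zip Bv2), cut2,
           stepv + ((nN - hf : Nat) : Int)) ∧
      pvStepB g (nN : Int) (hf : Int) (Av, Bv, cutv, pvSaOf g nN Av, pvSaOf g nN Bv) i
        = (Av2, Bv2, cut2, pvSaOf g nN Av2, pvSaOf g nN Bv2) ∧
      Av2.length = hf ∧ Bv2.length = nN - hf := by
  have hKA : (PySem.List.pyRange 0 (hf : Int) 1).length = hf := by
    rw [PySem.List.length_pyRange_one]; omega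
  have hKB : (PySem.List.pyRange (hf : Int) (nN : Int) 1).length = nN - hf := by
    rw [PySem.List.length_pyRange_one]; omega
  have hi0 : 0 ≤ i := by simp [hi]
  have hin : i < (nN : Int) := by rw [hi]; exact_mod_cast lt_of_lt_of_le hiN hle
  have hkeysB := pv_zip_dict_keys (PySem.List.pyRange (hf : Int) (nN : Int) 1) Bv (by rw [hKB, hB])
  have hmemKB : ∀ j ∈ PySem.List.pyRange (hf : Int) (nN : Int) 1, 0 ≤ j ∧ j < (nN : Int) := by
    intro j hj
    rw [PySem.List.mem_pyRange_one] at hj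
    constructor
    · exact le_trans (by positivity) hj.1
    · exact hj.2
  have hsim := pv_inner_sim g hf nN Av Bv hA hB hle i hi0 hin
    (PySem.List.pyRange (hf : Int) (nN : Int) 1) hmemKB 0 none stepv
  simp only [pvStepA, pvStepB, hkeysB, hsim, hKB]
  rcases hv : (List.foldl (pvInnerB g (pvSaOf g nN Av) (pvSaOf g nN Bv) i)
      (0, none) (PySem.List.pyRange (hf : Int) (nN : Int) 1)).2 with _ | v
  · exact ⟨Av, Bv, cutv, rfl, rfl, hA, hB⟩
  · -- the chosen best_vert is an element of B's key range
    have hvm : v ∈ PySem.List.pyRange (hf : Int) (nN : Int) 1 := by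
      rcases pv_innerB_some_mem g (pvSaOf g nN Av) (pvSaOf g nN Bv) i _ _ v hv with h | h
      · exact h
      · simp at h
    rw [PySem.List.mem_pyRange_one] at hvm
    obtain ⟨hv1, hv2⟩ := hvm
    set vN : Nat := v.toNat with hvN
    have hveq : v = (vN : Int) := by omega
    have hfv : hf ≤ vN := by omega
    have hvn : vN < nN := by omega
    have hq : vN - hf < (PySem.List.pyRange (hf : Int) (nN : Int) 1).length := by omega
    have hkey : (PySem.List.pyRange (hf : Int) (nN : Int) 1)[vN - hf] = v := by
      rw [PySem.List.getElem_pyRange_one]; omega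
    have hqB : vN - hf < Bv.length := by omega
    have hget : (PySem.Dict.mk ((PySem.List.pyRange (hf : Int) (nN : Int) 1).zip Bv)).get? v
        = some (Bv[vN - hf]'hqB) := by
      rw [← hkey]
      exact pv_zip_dict_get? _ Bv (vN - hf) (PySem.List.nodup_pyRange_one _ _) (by omega) hq
    have hiKA : i = (PySem.List.pyRange 0 (hf : Int) 1)[iN]'(by omega) := by
      rw [PySem.List.getElem_pyRange_one]; omega
    have hinsA : (PySem.Dict.mk ((PySem.List.pyRange 0 (hf : Int) 1).zip Av)).insert i (Bv[vN - hf]'hqB)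
        = PySem.Dict.mk ((PySem.List.pyRange 0 (hf : Int) 1).zip (Av.set iN (Bv[vN - hf]'hqB))) := by
      rw [hiKA]
      exact pv_zip_dict_insert _ Av iN _ (PySem.List.nodup_pyRange_one _ _) (by omega) (by omega)
    have hinsB : (PySem.Dict.mk ((PySem.List.pyRange (hf : Int) (nN : Int) 1).zip Bv)).insert v i
        = PySem.Dict.mk ((PySem.List.pyRange (hf : Int) (nN : Int) 1).zip (Bv.set (vN - hf) i)) := by
      rw [← hkey]
      exact pv_zip_dict_insert _ Bv (vN - hf) _ (PySem.List.nodup_pyRange_one _ _) (by omega) hq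
    have hiA : iN < Av.length := by omega
    have haOld : PySem.List.pyGetD Av i 0 = Av[iN]'hiA := by
      rw [hi, PySem.List.pyGetD_natCast, List.getD_eq_getElem?_getD, List.getElem?_eq_getElem hiA]
      rfl
    have hbOld : PySem.List.pyGetD Bv (v - (hf : Int)) 0 = Bv[vN - hf]'hqB := by
      have : v - (hf : Int) = ((vN - hf : Nat) : Int) := by omega
      rw [this, PySem.List.pyGetD_natCast, List.getD_eq_getElem?_getD, List.getElem?_eq_getElem hqB]
      rfl
    have hsetA : PySem.List.pySetD Av i (Bv[vN - hf]'hqB) = Av.set iN (Bv[vN - hf]'hqB) := by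
      rw [hi, PySem.List.pySetD_natCast]
    have hsetB : PySem.List.pySetD Bv (v - (hf : Int)) i = Bv.set (vN - hf) i := by
      have : v - (hf : Int) = ((vN - hf : Nat) : Int) := by omega
      rw [this, PySem.List.pySetD_natCast]
    have hsaA : (PySem.List.pyRange 0 (nN : Int) 1).map
          (fun x => PySem.List.pyGetD (pvSaOf g nN Av) x 0 + pvG g x (Bv[vN - hf]'hqB) - pvG g x (Av[iN]'hiA))
        = pvSaOf g nN (Av.set iN (Bv[vN - hf]'hqB)) := by
      unfold pvSaOf
      apply List.map_congr_left
      intro x hx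
      rw [PySem.List.mem_pyRange_one] at hx
      simp only [PySem.List.pyGetD_map_pyRange_of_nonneg _ _ _ _ hx.1 hx.2]
      simp only [pvSA, pv_sum_map_set (fun k => pvG g x k) Av iN _ hiA]
    have hsaB : (PySem.List.pyRange 0 (nN : Int) 1).map
          (fun x => PySem.List.pyGetD (pvSaOf g nN Bv) x 0 + pvG g x i - pvG g x (Bv[vN - hf]'hqB))
        = pvSaOf g nN (Bv.set (vN - hf) i) := by
      unfold pvSaOf
      apply List.map_congr_left
      intro x hx
      rw [PySem.List.mem_pyRange_one] at hx
      simp only [PySem.List.pyGetD_map_pyRange_of_nonneg _ _ _ _ hx.1 hx.2]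
      simp only [pvSA, pv_sum_map_set (fun k => pvG g x k) Bv (vN - hf) _ hqB]
    refine ⟨Av.set iN (Bv[vN - hf]'hqB), Bv.set (vN - hf) i, cutv
        + (List.foldl (pvInnerB g (pvSaOf g nN Av) (pvSaOf g nN Bv) i)
            (0, none) (PySem.List.pyRange (hf : Int) (nN : Int) 1)).1, ?_, ?_, by simp [hA], by simp [hB]⟩
    · simp only [hget, Option.getD_some, hinsA, hinsB]
    · simp only [haOld, hbOld, hsetA, hsetB, hsaA, hsaB]

-- the whole pass
theorem pv_main (g : List (List Int)) (hf nN : Nat) (hle : hf ≤ nN) :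
    ∀ (L : List Int), (∀ i ∈ L, ∃ iN : Nat, i = (iN : Int) ∧ iN < hf) →
    ∀ (Av Bv : List Int) (cutv stepv : Int),
      Av.length = hf → Bv.length = nN - hf →
      ∃ Av' Bv' cut',
        L.foldl (pvStepA g)
            (PySem.Dict.mk ((PySem.List.pyRange 0 (hf : Int) 1).zip Av),
             PySem.Dict.mk ((PySem.List.pyRange (hf : Int) (nN : Int) 1).zip Bv), cutv, stepv)
          = (PySem.Dict.mk ((PySem.List.pyRange 0 (hf : Int) 1).zip Av'),
             PySem.Dict.mk ((PySem.List.pyRange (hf : Int) (nN : Int) 1).zip Bv'), cut',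
             stepv + (L.length : Int) * ((nN - hf : Nat) : Int)) ∧
        L.foldl (pvStepB g (nN : Int) (hf : Int)) (Av, Bv, cutv, pvSaOf g nN Av, pvSaOf g nN Bv)
          = (Av', Bv', cut', pvSaOf g nN Av', pvSaOf g nN Bv') ∧
        Av'.length = hf ∧ Bv'.length = nN - hf := by
  intro L
  induction L with
  | nil =>
    intro _ Av Bv cutv stepv hA hB
    exact ⟨Av, Bv, cutv, by simp, by simp, hA, hB⟩
  | cons i t ih =>
    intro hmem Av Bv cutv stepv hA hB
    obtain ⟨iN, hi, hiN⟩ := hmem i (List.mem_cons_self ..)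
    obtain ⟨Av2, Bv2, cut2, hstA, hstB, hA2, hB2⟩ :=
      pv_step_sim g hf nN hle Av Bv cutv stepv hA hB i iN hi hiN
    obtain ⟨Av', Bv', cut', hfA, hfB, hA', hB'⟩ :=
      ih (fun j hj => hmem j (List.mem_cons_of_mem _ hj)) Av2 Bv2 cut2
        (stepv + ((nN - hf : Nat) : Int)) hA2 hB2
    refine ⟨Av', Bv', cut', ?_, ?_, hA', hB'⟩
    · rw [List.foldl_cons, hstA, hfA]
      have hs : stepv + ((nN - hf : Nat) : Int) + (t.length : Int) * ((nN - hf : Nat) : Int)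
          = stepv + (((i :: t).length : Nat) : Int) * ((nN - hf : Nat) : Int) := by
        push_cast [List.length_cons]
        ring
      rw [hs]
    · rw [List.foldl_cons, hstB, hfB]

theorem pv_dict_init (ks : List Int) (hnd : ks.Nodup) :
    ks.foldl (fun d v => d.insert v v) (PySem.Dict.empty : PySem.Dict Int Int)
      = PySem.Dict.mk (ks.zip ks) := by
  apply PySem.Dict.ext
  rw [PySem.Dict.items_foldl_insert_fresh ks (fun a => a) (fun a => a) _
    (by intro a _; simp) (by simpa using hnd)]
  simp [pv_zip_self, PySem.Dict.empty]

theorem pv_checkSize_eq (g : List (List Int)) (KA KB : List Int) :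
    pvCheckSize g KA KB = (KA.map (fun i => (KB.map (fun j => pvG g i j)).sum)).sum := by
  unfold pvCheckSize
  have h1 : ∀ (s i : Int), KB.foldl (fun s j => s + pvG g i j) s
      = s + (KB.map (fun j => pvG g i j)).sum := fun s i => PySem.List.foldl_add _ _ _
  simp only [h1]
  rw [PySem.List.foldl_add]
  simp

-- ===== VERDICT (by name: the statement is the Claim_ definition above) =====
theorem Kernigan_Lin_for_all_vertices_spec : Claim_equal_Kernigan_Lin_for_all_vertices := by
  intro graph _ _
  unfold Spec_Kernigan_Lin_for_all_vertices
  simp only [Kernigan_Lin_for_all_vertices, Kernigan_Lin_for_all_vertices_alt]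
  have hhf : PySem.Int.floordiv ((graph.length : Nat) : Int) 2 = ((graph.length / 2 : Nat) : Int) := by
    exact_mod_cast PySem.Int.floordiv_natCast graph.length 2
  rw [hhf]
  set nN : Nat := graph.length with hnN
  set hf : Nat := nN / 2 with hhf2
  have hle : hf ≤ nN := Nat.div_le_self _ _
  have hKAlen : (PySem.List.pyRange 0 (hf : Int) 1).length = hf := by
    rw [PySem.List.length_pyRange_one]; omega
  have hKBlen : (PySem.List.pyRange (hf : Int) (nN : Int) 1).length = nN - hf := by
    rw [PySem.List.length_pyRange_one]; omega
  rw [pv_dict_init _ (PySem.List.nodup_pyRange_one _ _),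
      pv_dict_init _ (PySem.List.nodup_pyRange_one _ _),
      pv_zip_dict_keys (PySem.List.pyRange 0 (hf : Int) 1) _ rfl,
      pv_zip_dict_keys (PySem.List.pyRange (hf : Int) (nN : Int) 1) _ rfl,
      pv_checkSize_eq]
  have hmemKA : ∀ i ∈ PySem.List.pyRange 0 (hf : Int) 1, ∃ iN : Nat, i = (iN : Int) ∧ iN < hf := by
    intro i hi
    rw [PySem.List.mem_pyRange_one] at hi
    exact ⟨i.toNat, by omega, by omega⟩
  obtain ⟨Av', Bv', cut', hfA, hfB, hA', hB'⟩ :=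
    pv_main graph hf nN hle (PySem.List.pyRange 0 (hf : Int) 1) hmemKA
      (PySem.List.pyRange 0 (hf : Int) 1) (PySem.List.pyRange (hf : Int) (nN : Int) 1)
      (((PySem.List.pyRange 0 (hf : Int) 1).map
        (fun i => ((PySem.List.pyRange (hf : Int) (nN : Int) 1).map (fun j => pvG graph i j)).sum)).sum)
      0 hKAlen hKBlen
  unfold pvSaOf pvSA at hfB
  rw [hfA, hfB,
      pv_zip_dict_values _ Av' (by rw [hKAlen, hA']),
      pv_zip_dict_values _ Bv' (by rw [hKBlen, hB'])]
  have hstep : (0 : Int) + ((PySem.List.pyRange 0 (hf : Int) 1).length : Int) * ((nN - hf : Nat) : Int)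
      = (hf : Int) * ((nN : Int) - (hf : Int)) := by
    rw [hKAlen, Nat.cast_sub hle]
    ring
  rw [hstep]
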